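-- pv_equiv track=rewrite | github.com/jsnider3/JavaWorkspace | Competitive/Python/hacklib.py | bitstring_fillin
-- ===== SOURCE A (Python) =====
-- def bitstring_fillin(bitstring):
--   ''' Given a bitstring where some characters are hidden
--       with '?', return every possible string it could be.'''
--   if bitstring.count('?') == 0:
--     return [bitstring]
--   else:
--     fillers = '1' * bitstring.count('?')
--     locs = [ind for ind in range(len(bitstring)) if bitstring[ind] == '?']
--     results = []
--     while True:
--       arr = list(bitstring)
--       for (loc, fill) in zip(locs, fillers):
--         arr[loc] = fill
--       results.append(''.join(arr))
--       if fillers == '0' * bitstring.count('?'):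
--         return results[::-1]
--       else:
--         next_fill = bin(int(fillers, 2) - 1)[2:]
--         fillers = '0' * (bitstring.count('?') - len(next_fill)) + next_fill
-- ===== SOURCE B (Python) =====
-- def bitstring_fillin(bitstring):
--     ''' Given a bitstring where some characters are hidden
--         with '?', return every possible string it could be.'''
--     results = [[]]
--     for c in bitstring:
--         if c == '?':
--             results = [r + [b] for r in results for b in '01']
--         else:
--             for r in results:
--                 r.append(c)
--     return [''.join(r) for r in results]
-- ===== Notes on version B (the rewrite author's own statement) =====
-- stated objective: idiomatic
-- what changed: Replaced the manual all-ones-to-zeros binary countdown over a fillers string (int/bin round-trips, zero-padding, index assignment into positions, final list reversal) with a structural recursion over the characters that branches each '?' into '0' then '1' and concatenates, yielding the same ascending order directly.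
import Mathlib
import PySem

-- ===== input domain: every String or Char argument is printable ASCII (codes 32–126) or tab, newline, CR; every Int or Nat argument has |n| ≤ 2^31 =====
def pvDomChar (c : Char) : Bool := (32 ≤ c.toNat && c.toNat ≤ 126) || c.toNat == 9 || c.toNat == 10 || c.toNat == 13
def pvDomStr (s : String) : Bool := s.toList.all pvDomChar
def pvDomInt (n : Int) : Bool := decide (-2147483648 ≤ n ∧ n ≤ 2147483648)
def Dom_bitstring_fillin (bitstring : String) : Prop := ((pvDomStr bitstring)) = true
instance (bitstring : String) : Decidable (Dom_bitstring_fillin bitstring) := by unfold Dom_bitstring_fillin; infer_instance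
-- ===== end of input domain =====

-- ===== PORT A =====
-- B differs from A only in how the candidates are generated: A counts a binary fillers
-- string down from all-ones to all-zeros and reverses at the end; B recurses over the
-- characters, branching each '?' into '0' then '1' (objective: idiomatic).

-- A-side helpers: transliterations of A's expressions
-- locs = [ind for ind in range(len(bitstring)) if bitstring[ind] == '?']  (all indices in range)
def pvLocs (sl : List Char) : List Nat :=
  (List.range sl.length).filter (fun i => sl.getD i ' ' == '?')

-- for (loc, fill) in zip(locs, fillers): arr[loc] = fill   (locs are in-range indices)
def pvFillA (sl : List Char) (locs : List Nat) (fillers : List Char) : List Char :=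
  (locs.zip fillers).foldl (fun arr p => arr.set p.1 p.2) sl

-- bin(n)[2:] for n >= 1 is binAux n; bin(0)[2:] = '0' handled in pvBin
def binAux : Nat → List Char
  | 0 => []
  | n+1 => binAux ((n+1)/2) ++ [if (n+1) % 2 = 1 then '1' else '0']
  termination_by n => n
  decreasing_by exact Nat.div_lt_self (Nat.succ_pos _) one_lt_two

def pvBin (n : Nat) : List Char := if n = 0 then ['0'] else binAux n

-- int(fillers, 2): exact for the 0/1 strings the loop manipulates
def binVal (l : List Char) : Nat :=
  l.foldl (fun a c => 2 * a + (if c = '1' then 1 else 0)) 0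

-- the 'while True' loop; fuel = int(fillers,2)+1 iterations make it structurally total
-- (proved sufficient below)
def aloop : Nat → List Char → List Nat → Nat → List Char → List String → List String
  | 0, _, _, _, _, _ => []
  | fuel+1, sl, locs, cnt, fillers, results =>
    let arr := pvFillA sl locs fillers
    let results' := results ++ [String.ofList arr]
    if fillers = List.replicate cnt '0' then results'.reverse
    else
      let next := pvBin (binVal fillers - 1)
      aloop fuel sl locs cnt (List.replicate (cnt - next.length) '0' ++ next) results'

def bitstring_fillin (bitstring : String) : List String :=
  let sl := bitstring.toList
  let cnt := sl.count '?'
  if cnt = 0 then [bitstring]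
  else
    let fillers := List.replicate cnt '1'
    aloop (binVal fillers + 1) sl (pvLocs sl) cnt fillers []

-- ===== PORT B =====
-- one step of B's forward sweep: branch at '?', else append c to every prefix
def bstep (results : List (List Char)) (c : Char) : List (List Char) :=
  if c = '?' then
    results.flatMap (fun r => (['0', '1'] : List Char).map (fun b => r ++ [b]))
  else
    results.map (fun r => r ++ [c])

def bitstring_fillin_alt (bitstring : String) : List String :=
  (bitstring.toList.foldl bstep [[]]).map (fun r => String.ofList r)

-- ===== PRECONDITION & SPEC =====
def Spec_bitstring_fillin (bitstring : String) (out : List String) : Prop := out = bitstring_fillin_alt bitstring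
instance (bitstring : String) (out : List String) : Decidable (Spec_bitstring_fillin bitstring out) := by unfold Spec_bitstring_fillin; infer_instance

-- ===== CLAIM (what is proved, stated in full; the proofs are below) =====
def Claim_equal_bitstring_fillin : Prop := ∀ (bitstring : String), Dom_bitstring_fillin bitstring → Spec_bitstring_fillin bitstring (bitstring_fillin bitstring)

-- ===== LEMMAS AND PROOFS =====

-- fixed-width binary representation A's fillers string runs through, msb first
def padbin (k n : Nat) : List Char :=
  List.replicate (k - (pvBin n).length) '0' ++ pvBin n

-- all 0/1 strings of length k, in ascending numeric (lexicographic) order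
def allBits : Nat → List (List Char)
  | 0 => [[]]
  | k+1 => (allBits k).map (fun b => '0' :: b) ++ (allBits k).map (fun b => '1' :: b)

-- substitute the bits bs into the '?' positions, structurally
def fill2 : List Char → List Char → List Char
  | [], _ => []
  | c :: rest, bs =>
    if c = '?' then
      match bs with
      | [] => []
      | b :: bs' => b :: fill2 rest bs'
    else c :: fill2 rest bs

lemma binAux_succ (n : Nat) (h : 0 < n) :
    binAux n = binAux (n / 2) ++ [if n % 2 = 1 then '1' else '0'] := by
  match n, h with
  | m+1, _ => simp [binAux]

lemma binVal_append_singleton (l : List Char) (c : Char) :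
    binVal (l ++ [c]) = 2 * binVal l + (if c = '1' then 1 else 0) := by
  simp [binVal, List.foldl_append]

lemma binVal_zeros_foldl (m : Nat) :
    List.foldl (fun a c => 2 * a + (if c = '1' then 1 else 0)) 0 (List.replicate m '0') = 0 := by
  induction m with
  | zero => rfl
  | succ m ih => simpa [List.replicate_succ] using ih

lemma binVal_zeros (m : Nat) : binVal (List.replicate m '0') = 0 :=
  binVal_zeros_foldl m

lemma binVal_zeros_append (m : Nat) (l : List Char) :
    binVal (List.replicate m '0' ++ l) = binVal l := by
  simp [binVal, List.foldl_append, binVal_zeros_foldl]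

lemma binVal_binAux : ∀ n, binVal (binAux n) = n := by
  intro n
  induction n using Nat.strong_induction_on with
  | _ n ih =>
    match n with
    | 0 => simp [binAux, binVal]
    | m+1 =>
      rw [binAux_succ (m+1) (Nat.succ_pos m), binVal_append_singleton,
        ih ((m+1)/2) (Nat.div_lt_self (Nat.succ_pos m) one_lt_two)]
      rcases Nat.mod_two_eq_zero_or_one (m+1) with h | h <;> simp [h] <;> omega

lemma binVal_pvBin (n : Nat) : binVal (pvBin n) = n := by
  by_cases h : n = 0
  · simp [pvBin, h, binVal]
  · simp [pvBin, h, binVal_binAux]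

lemma binVal_padbin (k n : Nat) : binVal (padbin k n) = n := by
  simp [padbin, binVal_zeros_append, binVal_pvBin]

lemma replicate_pred_append (k : Nat) (h : 1 ≤ k) (c : Char) :
    List.replicate (k - 1) c ++ [c] = List.replicate k c := by
  match k, h with
  | m+1, _ =>
    rw [show m + 1 - 1 = m from rfl]
    exact List.replicate_succ'.symm

lemma padbin_zero (k : Nat) (h : 1 ≤ k) : padbin k 0 = List.replicate k '0' := by
  simp only [padbin, pvBin]
  exact replicate_pred_append k h '0'

lemma padbin_ne_zeros (k v : Nat) : padbin k (v + 1) ≠ List.replicate k '0' := by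
  intro h
  have := binVal_padbin k (v + 1)
  rw [h, binVal_zeros] at this
  omega

lemma binAux_ones : ∀ k, binAux (2 ^ k - 1) = List.replicate k '1' := by
  intro k
  induction k with
  | zero => simp [binAux]
  | succ k ih =>
    have h2 : 2 ^ (k+1) = 2 * 2 ^ k := by rw [pow_succ]; ring
    have hp : 1 ≤ 2 ^ k := Nat.one_le_two_pow
    have hpos : 0 < 2 ^ (k+1) - 1 := by omega
    rw [binAux_succ _ hpos]
    have hdiv : (2 ^ (k+1) - 1) / 2 = 2 ^ k - 1 := by omega
    have hmod : (2 ^ (k+1) - 1) % 2 = 1 := by omega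
    rw [hdiv, hmod, ih]
    simp [← List.replicate_succ']

lemma pvBin_ones (k : Nat) (h : 1 ≤ k) : pvBin (2 ^ k - 1) = List.replicate k '1' := by
  have hp : 1 ≤ 2 ^ k := Nat.one_le_two_pow
  have hk : 2 ^ k - 1 ≠ 0 := by
    have : 2 ^ 1 ≤ 2 ^ k := Nat.pow_le_pow_right (by omega) h
    omega
  simp [pvBin, hk, binAux_ones]

lemma replicate_ones_padbin (k : Nat) (h : 1 ≤ k) :
    List.replicate k '1' = padbin k (2 ^ k - 1) := by
  rw [padbin, pvBin_ones k h]
  simp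

lemma aloop_succ (fuel : Nat) (sl : List Char) (locs : List Nat) (cnt : Nat)
    (fillers : List Char) (results : List String) :
    aloop (fuel + 1) sl locs cnt fillers results =
      if fillers = List.replicate cnt '0' then
        (results ++ [String.ofList (pvFillA sl locs fillers)]).reverse
      else
        aloop fuel sl locs cnt
          (List.replicate (cnt - (pvBin (binVal fillers - 1)).length) '0' ++
            pvBin (binVal fillers - 1))
          (results ++ [String.ofList (pvFillA sl locs fillers)]) := rfl

-- the loop, started at fillers = padbin k v with fuel v+1, emits fills of v, v-1, …, 0
lemma aloop_spec (sl : List Char) (locs : List Nat) (k : Nat) (hk : 1 ≤ k) :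
    ∀ v acc, aloop (v + 1) sl locs k (padbin k v) acc =
      (acc ++ ((List.range (v + 1)).map
        (fun i => String.ofList (pvFillA sl locs (padbin k i)))).reverse).reverse := by
  intro v
  induction v with
  | zero =>
    intro acc
    simp [aloop, padbin_zero k hk]
  | succ v ih =>
    intro acc
    rw [aloop_succ, if_neg (padbin_ne_zeros k v)]
    have hnext : pvBin (binVal (padbin k (v + 1)) - 1) = pvBin v := by
      rw [binVal_padbin]; norm_num
    rw [hnext]
    rw [show List.replicate (k - (pvBin v).length) '0' ++ pvBin v = padbin k v from rfl]
    rw [ih]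
    simp [List.range_succ, List.append_assoc]

lemma length_binAux_le : ∀ k n, n < 2 ^ k → (binAux n).length ≤ k := by
  intro k
  induction k with
  | zero =>
    intro n hn
    interval_cases n
    simp [binAux]
  | succ k ih =>
    intro n hn
    match n with
    | 0 => simp [binAux]
    | m+1 =>
      rw [binAux_succ (m+1) (Nat.succ_pos m)]
      have h2 : 2 ^ (k+1) = 2 * 2 ^ k := by rw [pow_succ]; ring
      have : (m+1)/2 < 2 ^ k := by omega
      have := ih ((m+1)/2) this
      simp [List.length_append]
      omega

lemma length_pvBin_le (k n : Nat) (hk : 1 ≤ k) (hn : n < 2 ^ k) : (pvBin n).length ≤ k := by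
  by_cases h : n = 0
  · simp [pvBin, h]; omega
  · simp [pvBin, h]; exact length_binAux_le k n hn

lemma padbin_half0 (k n : Nat) (hk : 1 ≤ k) (hn : n < 2 ^ k) :
    padbin (k + 1) n = '0' :: padbin k n := by
  have hl := length_pvBin_le k n hk hn
  simp only [padbin]
  rw [show k + 1 - (pvBin n).length = (k - (pvBin n).length) + 1 by omega,
    List.replicate_succ]
  simp

lemma padbin_shift (k n : Nat) (hk : 1 ≤ k) :
    padbin (k + 1) n = padbin k (n / 2) ++ [if n % 2 = 1 then '1' else '0'] := by
  match n with
  | 0 =>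
    simp only [padbin, pvBin]
    norm_num
    rw [show (['0','0'] : List Char) = ['0'] ++ ['0'] from rfl, ← List.append_assoc,
      replicate_pred_append k hk '0']
  | 1 =>
    simp only [padbin, pvBin]
    norm_num [binAux]
    rw [show (['0','1'] : List Char) = ['0'] ++ ['1'] from rfl, ← List.append_assoc,
      replicate_pred_append k hk '0']
  | m+2 =>
    have h1 : pvBin (m+2) = binAux ((m+2)/2) ++ [if (m+2) % 2 = 1 then '1' else '0'] := by
      simp only [pvBin, if_neg (by omega : ¬ m + 2 = 0)]
      exact binAux_succ (m+2) (by omega)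
    have h2 : pvBin ((m+2)/2) = binAux ((m+2)/2) := by
      simp only [pvBin, if_neg (by omega : ¬ (m+2)/2 = 0)]
    simp only [padbin, h1, h2, List.length_append, List.length_singleton]
    rw [show k + 1 - ((binAux ((m+2)/2)).length + 1) = k - (binAux ((m+2)/2)).length by omega]
    simp [List.append_assoc]

lemma binAux_top : ∀ k, 1 ≤ k → ∀ n, n < 2 ^ k → binAux (2 ^ k + n) = '1' :: padbin k n := by
  intro k hk
  induction k with
  | zero => omega
  | succ k ih =>
    intro n hn
    by_cases hk1 : 1 ≤ k
    · have h2 : 2 ^ (k+1) = 2 * 2 ^ k := by rw [pow_succ]; ring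
      rw [binAux_succ (2 ^ (k+1) + n) (by positivity)]
      have hdiv : (2 ^ (k+1) + n) / 2 = 2 ^ k + n / 2 := by omega
      have hmod : (2 ^ (k+1) + n) % 2 = n % 2 := by omega
      rw [hdiv, hmod, ih hk1 (n / 2) (by omega)]
      rw [padbin_shift k n hk1]
      simp
    · have hk0 : k = 0 := by omega
      subst hk0
      interval_cases n
      · rw [show 2 ^ (0+1) + 0 = 2 from rfl, binAux_succ 2 (by omega)]
        rw [show (2:Nat) / 2 = 1 from rfl, binAux_succ 1 (by omega)]
        norm_num [binAux, padbin, pvBin]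
      · rw [show 2 ^ (0+1) + 1 = 3 from rfl, binAux_succ 3 (by omega)]
        rw [show (3:Nat) / 2 = 1 from rfl, binAux_succ 1 (by omega)]
        norm_num [binAux, padbin, pvBin]

lemma length_padbin (k n : Nat) (hk : 1 ≤ k) (hn : n < 2 ^ k) : (padbin k n).length = k := by
  have := length_pvBin_le k n hk hn
  simp [padbin]
  omega

lemma padbin_half1 (k n : Nat) (hk : 1 ≤ k) (hn : n < 2 ^ k) :
    padbin (k + 1) (2 ^ k + n) = '1' :: padbin k n := by
  have htop := binAux_top k hk n hn
  have hne : ¬ 2 ^ k + n = 0 := by positivity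
  have hlen : (padbin k n).length = k := length_padbin k n hk hn
  have hpv : pvBin (2 ^ k + n) = '1' :: padbin k n := by
    rw [pvBin, if_neg hne]; exact htop
  have hpl : (pvBin (2 ^ k + n)).length = k + 1 := by rw [hpv]; simp [hlen]
  rw [show padbin (k+1) (2 ^ k + n) =
      List.replicate (k + 1 - (pvBin (2 ^ k + n)).length) '0' ++ pvBin (2 ^ k + n) from rfl,
    hpl]
  simp [hpv]

lemma range_map_padbin : ∀ k, 1 ≤ k → (List.range (2 ^ k)).map (padbin k) = allBits k := by
  intro k hk
  induction k with
  | zero => omega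
  | succ k ih =>
    by_cases hk1 : 1 ≤ k
    · have h2 : 2 ^ (k+1) = 2 ^ k + 2 ^ k := by rw [pow_succ]; omega
      rw [h2, List.range_add, List.map_append, List.map_map]
      have e0 : (List.range (2 ^ k)).map (padbin (k+1)) =
          (List.range (2 ^ k)).map (fun n => '0' :: padbin k n) := by
        apply List.map_congr_left
        intro n hn
        exact padbin_half0 k n hk1 (List.mem_range.mp hn)
      have e1 : (List.range (2 ^ k)).map (padbin (k+1) ∘ (fun i => 2 ^ k + i)) =
          (List.range (2 ^ k)).map (fun n => '1' :: padbin k n) := by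
        apply List.map_congr_left
        intro n hn
        exact padbin_half1 k n hk1 (List.mem_range.mp hn)
      rw [e0, e1, allBits]
      rw [← ih hk1]
      simp [List.map_map, Function.comp_def]
    · have hk0 : k = 0 := by omega
      subst hk0
      have : (2:Nat) ^ 1 = 2 := rfl
      rw [this]
      have hr : List.range 2 = [0, 1] := rfl
      rw [hr]
      simp only [List.map_cons, List.map_nil, allBits]
      norm_num [padbin, pvBin, binAux]

lemma foldl_set_shift : ∀ (ps : List (Nat × Char)) (x : Char) (arr : List Char),
    List.foldl (fun a p => a.set p.1 p.2) (x :: arr) (ps.map (Prod.map (· + 1) id)) =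
      x :: List.foldl (fun a p => a.set p.1 p.2) arr ps := by
  intro ps
  induction ps with
  | nil => intro x arr; rfl
  | cons q ps ih =>
    intro x arr
    simp only [List.map_cons, List.foldl_cons, Prod.map, id_eq, List.set_cons_succ]
    exact ih x (arr.set q.1 q.2)

lemma pvLocs_cons (c : Char) (rest : List Char) :
    pvLocs (c :: rest) =
      (if c = '?' then [0] else []) ++ (pvLocs rest).map (· + 1) := by
  simp only [pvLocs, List.length_cons, List.range_succ_eq_map]
  rw [List.filter_cons]
  have h1 : ((c :: rest).getD 0 ' ' == '?') = (c == '?') := by simp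
  rw [h1]
  have h2 : (List.range rest.length).map Nat.succ = (List.range rest.length).map (· + 1) := by
    simp
  rw [h2, List.filter_map]
  have h3 : ((fun i => (c :: rest).getD i ' ' == '?') ∘ (· + 1)) =
      (fun i => rest.getD i ' ' == '?') := by
    funext i; simp
  rw [h3]
  by_cases hc : c = '?' <;> simp [hc]

lemma fill2_of_pvFillA : ∀ (sl bs : List Char), bs.length = sl.count '?' →
    pvFillA sl (pvLocs sl) bs = fill2 sl bs := by
  intro sl
  induction sl with
  | nil => intro bs _; rfl
  | cons c rest ih =>
    intro bs hlen
    rw [pvLocs_cons]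
    by_cases hc : c = '?'
    · subst hc
      have hcount : ('?' :: rest).count '?' = rest.count '?' + 1 := by
        simp
      rw [hcount] at hlen
      match bs, hlen with
      | b :: bs', hlen =>
        have hlen' : bs'.length = rest.count '?' := by simpa using hlen
        simp only [pvFillA, if_true]
        rw [List.singleton_append, List.zip_cons_cons, List.foldl_cons]
        rw [show ('?' :: rest).set 0 b = b :: rest by simp [List.set]]
        rw [List.zip_map_left, foldl_set_shift]
        rw [show List.foldl (fun a p => a.set p.1 p.2) rest ((pvLocs rest).zip bs') =
            pvFillA rest (pvLocs rest) bs' from rfl]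
        rw [ih bs' hlen']
        simp [fill2]
    · have hcount : (c :: rest).count '?' = rest.count '?' := by
        simp [hc]
      rw [hcount] at hlen
      simp only [if_neg hc, List.nil_append, pvFillA]
      rw [List.zip_map_left, foldl_set_shift]
      rw [show List.foldl (fun a p => a.set p.1 p.2) rest ((pvLocs rest).zip bs) =
          pvFillA rest (pvLocs rest) bs from rfl]
      rw [ih bs hlen]
      simp [fill2, hc]

lemma bfold_spec : ∀ (sl : List Char) (res : List (List Char)),
    List.foldl bstep res sl =
      res.flatMap (fun r => (allBits (sl.count '?')).map (fun bits => r ++ fill2 sl bits)) := by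
  intro sl
  induction sl with
  | nil =>
    intro res
    simp [allBits, fill2]
  | cons c rest ih =>
    intro res
    rw [List.foldl_cons, ih]
    by_cases hc : c = '?'
    · subst hc
      rw [show ('?' :: rest).count '?' = rest.count '?' + 1 by simp]
      simp [bstep, allBits, List.flatMap_assoc, List.map_map, Function.comp_def, fill2,
        List.append_assoc]
    · rw [show (c :: rest).count '?' = rest.count '?' by simp [hc]]
      simp only [bstep, if_neg hc]
      rw [List.flatMap_map]
      simp [fill2, hc, List.append_assoc]

lemma fill2_nil_of_count_zero : ∀ sl : List Char, sl.count '?' = 0 → fill2 sl [] = sl := by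
  intro sl
  induction sl with
  | nil => intro _; rfl
  | cons c rest ih =>
    intro h
    have hc : c ≠ '?' := by
      intro hc; subst hc; simp at h
    have hr : rest.count '?' = 0 := by
      simp [hc] at h; simpa [hc] using h
    simp [fill2, hc, ih hr]

-- ===== VERDICT (by name: the statement is the Claim_ definition above) =====
theorem bitstring_fillin_spec : Claim_equal_bitstring_fillin := by
  intro s _
  unfold Spec_bitstring_fillin bitstring_fillin bitstring_fillin_alt
  set sl := s.toList with hsl
  rw [bfold_spec sl [[]]]
  by_cases h0 : sl.count '?' = 0
  · simp only [h0, reduceIte]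
    simp only [allBits, List.flatMap_cons, List.flatMap_nil, List.map_cons, List.map_nil,
      List.nil_append, List.append_nil]
    rw [fill2_nil_of_count_zero sl h0, hsl]
    simp
  · have hk : 1 ≤ sl.count '?' := Nat.one_le_iff_ne_zero.mpr h0
    set k := sl.count '?' with hkdef
    rw [if_neg h0]
    show aloop (binVal (List.replicate k '1') + 1) sl (pvLocs sl) k
      (List.replicate k '1') [] =
      List.map (fun r => String.ofList r)
        (List.flatMap (fun r => List.map (fun bits => r ++ fill2 sl bits) (allBits k)) [[]])
    have hinit : List.replicate k '1' = padbin k (2 ^ k - 1) := replicate_ones_padbin k hk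
    have hval : binVal (List.replicate k '1') = 2 ^ k - 1 := by
      rw [hinit, binVal_padbin]
    rw [hval, hinit, aloop_spec sl (pvLocs sl) k hk (2 ^ k - 1) []]
    have hpow : 2 ^ k - 1 + 1 = 2 ^ k := Nat.sub_add_cancel Nat.one_le_two_pow
    rw [hpow]
    simp only [List.nil_append, List.reverse_reverse, List.flatMap_cons, List.flatMap_nil,
      List.append_nil]
    rw [← range_map_padbin k hk, List.map_map, List.map_map]
    apply List.map_congr_left
    intro n hn
    have hn' : n < 2 ^ k := List.mem_range.mp hn
    have hlen : (padbin k n).length = k := length_padbin k n hk hn'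
    simp only [Function.comp_def]
    rw [fill2_of_pvFillA sl (padbin k n) (by rw [hlen])]
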